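-- pv_equiv track=rewrite | github.com/tiezhuli001/marten-runtime | src/marten_runtime/subagents/tool_profiles.py | _selector_allows_tool
-- ===== SOURCE A (Python) =====
-- def _selector_allows_tool(parent_allowed_tools: list[str], tool_name: str) -> bool:
--     selectors = set(parent_allowed_tools)
--     if "*" in selectors or tool_name in selectors:
--         return True
--     if "builtin:*" in selectors:
--         return True
--     if tool_name == "mcp" and any(
--         selector == "mcp:*" or selector.startswith("mcp:")
--         for selector in selectors
--     ):
--         return True
--     return False
-- ===== SOURCE B (Python) =====
-- def _selector_allows_tool(parent_allowed_tools: list[str], tool_name: str) -> bool: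
--     for selector in parent_allowed_tools:
--         if (
--             selector == "*"
--             or selector == tool_name
--             or selector == "builtin:*"
--             or (tool_name == "mcp" and selector.startswith("mcp:"))
--         ):
--             return True
--     return False
-- ===== Notes on version B (the rewrite author's own statement) =====
-- stated objective: simpler
-- what changed: Replaced the set construction plus four independent membership/any checks with a single early-returning loop over the list that tests each selector once.
import Mathlib
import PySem

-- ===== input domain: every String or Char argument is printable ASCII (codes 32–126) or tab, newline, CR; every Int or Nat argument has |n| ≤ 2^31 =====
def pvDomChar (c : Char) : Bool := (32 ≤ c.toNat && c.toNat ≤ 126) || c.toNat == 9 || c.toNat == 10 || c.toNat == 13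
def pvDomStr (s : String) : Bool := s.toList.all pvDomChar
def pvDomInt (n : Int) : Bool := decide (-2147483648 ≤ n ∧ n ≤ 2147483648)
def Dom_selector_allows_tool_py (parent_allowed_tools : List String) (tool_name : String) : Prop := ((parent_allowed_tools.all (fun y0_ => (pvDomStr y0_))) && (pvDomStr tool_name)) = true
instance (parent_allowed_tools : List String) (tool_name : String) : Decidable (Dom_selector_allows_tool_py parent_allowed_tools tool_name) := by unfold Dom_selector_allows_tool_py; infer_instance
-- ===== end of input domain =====

-- B replaces the set construction and the four separate membership/any checks with one early-returning loop over the list (objective: simpler; same cost).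


-- ===== PORT A =====
def selector_allows_tool_py (parent_allowed_tools : List String) (tool_name : String) : Bool :=
  let selectors := PySem.Set.ofList parent_allowed_tools
  if PySem.Set.contains selectors "*" || PySem.Set.contains selectors tool_name then
    true
  else if PySem.Set.contains selectors "builtin:*" then
    true
  else if tool_name == "mcp" &&
      selectors.any (fun selector => selector == "mcp:*" || PySem.Str.startswith selector "mcp:") then
    true
  else
    false

-- ===== PORT B =====
def selector_allows_tool_py_alt (parent_allowed_tools : List String) (tool_name : String) : Bool :=
  match parent_allowed_tools with
  | [] => false
  | selector :: rest =>
    if selector == "*" || selector == tool_name || selector == "builtin:*" ||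
        (tool_name == "mcp" && PySem.Str.startswith selector "mcp:") then
      true
    else
      selector_allows_tool_py_alt rest tool_name

-- ===== PRECONDITION & SPEC =====
def Spec_selector_allows_tool_py (parent_allowed_tools : List String) (tool_name : String) (out : Bool) : Prop := out = selector_allows_tool_py_alt parent_allowed_tools tool_name
instance (parent_allowed_tools : List String) (tool_name : String) (out : Bool) : Decidable (Spec_selector_allows_tool_py parent_allowed_tools tool_name out) := by unfold Spec_selector_allows_tool_py; infer_instance

-- ===== CLAIM (what is proved, stated in full; the proofs are below) =====
def Claim_equal_selector_allows_tool_py : Prop := ∀ (parent_allowed_tools : List String) (tool_name : String), Dom_selector_allows_tool_py parent_allowed_tools tool_name → Spec_selector_allows_tool_py parent_allowed_tools tool_name (selector_allows_tool_py parent_allowed_tools tool_name)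

-- ===== LEMMAS AND PROOFS =====

-- B's early-returning loop is List.any of its per-selector test.
theorem alt_eq_any (xs : List String) (t : String) :
    selector_allows_tool_py_alt xs t =
      xs.any (fun s => s == "*" || s == t || s == "builtin:*" ||
        (t == "mcp" && PySem.Str.startswith s "mcp:")) := by
  induction xs with
  | nil => rfl
  | cons s rest ih =>
    simp only [selector_allows_tool_py_alt, List.any_cons, ih]
    split_ifs with h
    · simp only [h, Bool.true_or]
    · simp only [Bool.not_eq_true] at h
      simp only [h, Bool.false_or]

-- "mcp:*" itself startswith "mcp:", so A's extra disjunct is redundant.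
theorem mcp_pred (s : String) :
    (s == "mcp:*" || PySem.Str.startswith s "mcp:") = PySem.Str.startswith s "mcp:" := by
  by_cases h : s = "mcp:*"
  · subst h; decide
  · simp [h]

theorem any_or_split (xs : List String) (f g : String → Bool) :
    xs.any (fun s => f s || g s) = (xs.any f || xs.any g) := by
  induction xs with
  | nil => rfl
  | cons s rest ih =>
    simp only [List.any_cons, ih]
    cases f s <;> cases g s <;> simp

theorem any_const_and (xs : List String) (c : Bool) (p : String → Bool) :
    xs.any (fun s => c && p s) = (c && xs.any p) := by
  induction xs with
  | nil => cases c <;> rfl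
  | cons s rest ih =>
    simp only [List.any_cons, ih]
    cases c <;> cases p s <;> simp

theorem contains_eq_any (xs : List String) (a : String) :
    xs.contains a = xs.any (fun s => s == a) := by
  induction xs with
  | nil => rfl
  | cons s rest ih =>
    simp only [List.contains_cons, List.any_cons, ih]
    cases h : s == a <;> simp_all [BEq.comm]

theorem any_ofList (xs : List String) (p : String → Bool) :
    (PySem.Set.ofList xs).any p = xs.any p := by
  rw [Bool.eq_iff_iff]
  simp only [List.any_eq_true]
  constructor
  · rintro ⟨s, hs, hp⟩; exact ⟨s, (PySem.Set.mem_ofList xs s).1 hs, hp⟩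
  · rintro ⟨s, hs, hp⟩; exact ⟨s, (PySem.Set.mem_ofList xs s).2 hs, hp⟩

theorem contains_ofList (xs : List String) (a : String) :
    PySem.Set.contains (PySem.Set.ofList xs) a = xs.contains a := by
  rw [PySem.Set.contains, contains_eq_any, contains_eq_any, any_ofList]

-- ===== VERDICT (by name: the statement is the Claim_ definition above) =====
theorem selector_allows_tool_py_spec : Claim_equal_selector_allows_tool_py := by
  intro xs t _
  unfold Spec_selector_allows_tool_py
  rw [alt_eq_any, any_or_split, any_or_split, any_or_split, any_const_and,
    ← contains_eq_any, ← contains_eq_any, ← contains_eq_any]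
  simp only [selector_allows_tool_py, contains_ofList, any_ofList, mcp_pred]
  cases c1 : xs.contains "*" <;> cases c2 : xs.contains t <;>
    cases c3 : xs.contains "builtin:*" <;>
    cases c4 : (t == "mcp" && xs.any (fun s => PySem.Str.startswith s "mcp:")) <;>
    simp_all
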